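-- pv_equiv track=rewrite | github.com/pycoder01/Greedy-Dungeon-Treasure-Hunter | utility.py | readable_name
-- ===== SOURCE A (Python) =====
-- def readable_name(class_name,sep=' '):
--     """Break a string apart at any uppercase letters."""
--     answer = ''
--     first = True
--     for ch in class_name:
--         if ch.isupper() and not first:
--             answer += sep
--         if first: first = False;
--         answer += ch
--     return answer
-- ===== SOURCE B (Python) =====
-- import re
--
-- def readable_name(class_name, sep=' '):
--     """Break a string apart at any uppercase letters."""
--     return re.sub(r'(?<!^).', lambda m: sep + m.group(0) if m.group(0).isupper() else m.group(0), class_name)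
-- ===== Notes on version B (the rewrite author's own statement) =====
-- stated objective: idiomatic
-- what changed: Replaces the manual character loop with a first-char flag and string concatenation by a single re.sub over r'(?<!^).' whose function replacement returns sep+ch for uppercase characters, delegating the scan to the regex engine.
import Mathlib
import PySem

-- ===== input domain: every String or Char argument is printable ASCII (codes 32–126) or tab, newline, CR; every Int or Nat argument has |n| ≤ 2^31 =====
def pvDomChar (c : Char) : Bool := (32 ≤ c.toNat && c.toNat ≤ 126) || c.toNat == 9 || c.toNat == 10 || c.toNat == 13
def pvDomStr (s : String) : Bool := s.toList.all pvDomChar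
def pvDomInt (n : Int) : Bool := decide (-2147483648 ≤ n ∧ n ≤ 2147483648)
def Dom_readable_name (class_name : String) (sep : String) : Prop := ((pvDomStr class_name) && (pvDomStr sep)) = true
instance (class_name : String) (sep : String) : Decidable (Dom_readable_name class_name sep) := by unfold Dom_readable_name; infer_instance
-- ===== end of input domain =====

-- B replaces A's manual flag-tracking concatenation loop by a regex-style substitution
-- (each non-initial character is rewritten to sep+ch when uppercase); objective: idiomatic.

-- ===== PORT A =====
-- literal transliteration of A's loop: state = (answer, first), one step per character
def readable_name (class_name : String) (sep : String) : String :=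
  let r := class_name.toList.foldl (fun (st : List Char × Bool) ch =>
    let answer := if PySem.Chars.isupper ch && !st.2 then st.1 ++ sep.toList else st.1
    let first := if st.2 then false else st.2
    (answer ++ [ch], first)) ([], true)
  String.ofList r.1

-- ===== PORT B =====
-- Source B: re.sub(r'(?<!^).', f, class_name) — the first character is untouched, every later
-- character ch becomes sep ++ ch when uppercase, else ch (ported by hand, exact: on the
-- printable-ASCII/tab/newline domain '.' leaves '\n' unchanged, as does f on non-uppercase)
def readable_name_alt (class_name : String) (sep : String) : String :=
  match class_name.toList with
  | [] => ""
  | c :: rest =>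
      String.ofList (c :: rest.flatMap (fun ch =>
        if PySem.Chars.isupper ch then sep.toList ++ [ch] else [ch]))

-- ===== PRECONDITION & SPEC =====
def Spec_readable_name (class_name : String) (sep : String) (out : String) : Prop := out = readable_name_alt class_name sep
instance (class_name : String) (sep : String) (out : String) : Decidable (Spec_readable_name class_name sep out) := by unfold Spec_readable_name; infer_instance

-- ===== CLAIM (what is proved, stated in full; the proofs are below) =====
def Claim_equal_readable_name : Prop := ∀ (class_name : String) (sep : String), Dom_readable_name class_name sep → Spec_readable_name class_name sep (readable_name class_name sep)

-- ===== LEMMAS AND PROOFS =====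

-- ===== VERDICT (by name: the statement is the Claim_ definition above) =====
theorem aLoop_run (sep : List Char) (l : List Char) (acc : List Char) :
    l.foldl (fun (st : List Char × Bool) ch =>
      ((if PySem.Chars.isupper ch = true ∧ st.2 = false then st.1 ++ sep else st.1) ++ [ch], false))
      (acc, false)
    = (acc ++ l.flatMap (fun ch =>
        if PySem.Chars.isupper ch then sep ++ [ch] else [ch]), false) := by
  induction l generalizing acc with
  | nil => simp
  | cons ch t ih =>
      simp only [List.foldl_cons]
      by_cases h : PySem.Chars.isupper ch = true <;> simp [h, ih]

theorem readable_name_spec : Claim_equal_readable_name := by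
  intro class_name sep _
  unfold Spec_readable_name readable_name readable_name_alt
  cases h : class_name.toList with
  | nil => simp
  | cons c rest => simp only [List.foldl_cons]; simp [aLoop_run]
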